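-- pv_equiv track=rewrite | github.com/Aasthaengg/IBMdataset | Python_codes/p03687/s357341584.py | f
-- ===== SOURCE A (Python) =====
-- def f(s, al):
--     cnt = 0
--     while True:
--         if len(s) == 0:
--             return cnt
--
--         if len(set(s)) == 1 and s[0] == al:
--             return cnt
--
--         t = ""
--         for i in range(len(s)-1):
--             if al in s[i:i+2]:
--                 t += al
--             else:
--                 t += s[i]
--
--         s = t
--         cnt += 1
-- ===== SOURCE B (Python) =====
-- def f(s, al):
--     # One right-to-left pass: for each position, the step count after which it is
--     # settled is the distance to the nearest `al` at or after it (capped by the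
--     # distance to the end, where positions get trimmed away); the answer is the max.
--     ans = 0
--     e = 0  # distance from the current position to the next `al` (or to the end)
--     for ch in reversed(s):
--         e = 0 if ch == al else e + 1
--         if e > ans:
--             ans = e
--     return ans
-- ===== Notes on version B (the rewrite author's own statement) =====
-- stated objective: faster
-- what changed: Replaces the repeated rebuild-the-whole-string simulation (one pass per step until everything equals al) by a single right-to-left scan that computes, for each position, the distance to the nearest al at or after it (capped by the distance to the end, where trimming removes it) and returns the maximum.
-- outside the precondition, e.g. on f('ab', ''): A returns 1, B returns 2; on f('ab', 'ab'): A does not finish within the time limit, B returns 2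
import Mathlib
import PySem

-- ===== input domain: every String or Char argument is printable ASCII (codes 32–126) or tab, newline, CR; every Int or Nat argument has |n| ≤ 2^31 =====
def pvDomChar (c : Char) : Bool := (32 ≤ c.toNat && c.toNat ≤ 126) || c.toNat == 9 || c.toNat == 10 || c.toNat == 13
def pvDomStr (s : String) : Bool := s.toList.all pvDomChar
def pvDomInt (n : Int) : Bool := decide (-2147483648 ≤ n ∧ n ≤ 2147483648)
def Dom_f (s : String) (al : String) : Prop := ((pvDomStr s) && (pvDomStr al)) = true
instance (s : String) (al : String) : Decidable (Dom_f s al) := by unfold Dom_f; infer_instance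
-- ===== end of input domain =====

-- B replaces A's step-by-step rebuild of the whole string with one right-to-left
-- scan (objective: faster; a timing run measures it).

-- ===== PORT A =====
-- one body of the while-loop: t = "" ; for i in range(len(s)-1): t += al if al in s[i:i+2] else s[i]
-- (t += s[i] is rendered as appending the one-character slice s[i:i+1])
def pvStepA (alL : List Char) (s : List Char) : List Char :=
  (PySem.List.pyRange 0 (PySem.List.len s - 1) 1).foldl
    (fun t i =>
      if PySem.Chars.isIn alL (PySem.List.slice s (some i) (some (i + 2))) then t ++ alL
      else t ++ PySem.List.slice s (some i) (some (i + 1)))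
    []

-- the while-loop, fuel-bounded: whenever len(al) ≠ 2 each iteration shortens s by
-- one, so fuel = len(s)+1 never runs out on the inputs Pre_f admits (for len(al) = 2
-- the Python can diverge; those inputs are outside Pre_f).
def pvLoopA (alL : List Char) : Nat → List Char → Int → Int
  | 0, _, cnt => cnt
  | fuel + 1, s, cnt =>
    if s.length = 0 then cnt
    else if ((PySem.Set.ofList s).length == 1
              && ((PySem.List.pyGet? s 0).any fun ch => decide (alL = [ch]))) then cnt
    else pvLoopA alL fuel (pvStepA alL s) (cnt + 1)

def f (s : String) (al : String) : Int :=
  pvLoopA al.toList (s.toList.length + 1) s.toList 0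

-- ===== PORT B =====
-- ans = 0; e = 0
-- for ch in reversed(s): e = 0 if ch == al else e + 1; if e > ans: ans = e
-- return ans     (ch == al is the 1-char string [ch] equalling al)
def f_alt (s : String) (al : String) : Int :=
  (s.toList.reverse.foldl
    (fun (p : Int × Int) ch =>
      let e : Int := if [ch] = al.toList then 0 else p.2 + 1
      (if e > p.1 then e else p.1, e))
    (0, 0)).1

-- ===== PRECONDITION & SPEC =====
-- Pre_f excludes al of length 0 (Python's `al in s[i:i+2]` then always holds, so A
-- collapses any non-empty s in one step and returns 1), and length-2 al occurring as
-- a substring of s (the matching windows then rebuild al forever and A diverges).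
def Pre_f (s : String) (al : String) : Prop :=
  al.toList.length ≠ 0 ∧ (al.toList.length = 2 → ¬ al.toList <:+: s.toList)
instance (s : String) (al : String) : Decidable (Pre_f s al) := by unfold Pre_f; infer_instance

def pvWitness_f : String × String := ("ab", "a")

def Spec_f (s : String) (al : String) (out : Int) : Prop := out = f_alt s al
instance (s : String) (al : String) (out : Int) : Decidable (Spec_f s al out) := by unfold Spec_f; infer_instance

-- ===== CLAIM (what is proved, stated in full; the proofs are below) =====
def Claim_equal_f : Prop := ∀ (s : String) (al : String), Dom_f s al → Pre_f s al → Spec_f s al (f s al)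

-- ===== LEMMAS AND PROOFS =====

-- structural form of one rewriting step: each window s[i:i+2] in order
def pvStepList (alL : List Char) : List Char → List Char
  | x :: y :: r => (if PySem.Chars.isIn alL [x, y] then alL else [x]) ++ pvStepList alL (y :: r)
  | _ => []

-- (ans, e) of B's scan, built structurally from the right end of the list:
-- e = distance to the nearest position matching al (or to the end), ans = max of all e
def pvSpec (alL : List Char) : List Char → Nat × Nat
  | [] => (0, 0)
  | x :: r =>
    let p := pvSpec alL r
    let e := if [x] = alL then 0 else p.2 + 1
    (max p.1 e, e)

lemma pvIsIn_pair (c x y : Char) : PySem.Chars.isIn [c] [x, y] = (c == x || c == y) := by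
  rw [Bool.eq_iff_iff, PySem.Chars.isIn_iff_infix, List.singleton_infix_iff]; simp

lemma pvSlice2 (s : List Char) (k : Nat) :
    PySem.List.slice s (some (k : Int)) (some ((k : Int) + 2)) = (s.drop k).take 2 := by
  rw [PySem.List.slice_toNat s (a := (k : Int)) (b := (k : Int) + 2) (by positivity) (by positivity)]
  have h1 : ((k : Int) + 2).toNat = k + 2 := by omega
  have h2 : ((k : Int)).toNat = k := by omega
  rw [h1, h2]
  congr 1
  omega

lemma pvSlice1 (s : List Char) (k : Nat) :
    PySem.List.slice s (some (k : Int)) (some ((k : Int) + 1)) = (s.drop k).take 1 := by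
  rw [PySem.List.slice_toNat s (a := (k : Int)) (b := (k : Int) + 1) (by positivity) (by positivity)]
  have h1 : ((k : Int) + 1).toNat = k + 1 := by omega
  have h2 : ((k : Int)).toNat = k := by omega
  rw [h1, h2]
  congr 1
  omega

lemma pvFlatWindows (alL : List Char) : ∀ (s : List Char),
    (List.range (s.length - 1)).flatMap
      (fun k => if PySem.Chars.isIn alL ((s.drop k).take 2) then alL else (s.drop k).take 1)
      = pvStepList alL s
  | [] => by simp [pvStepList]
  | [x] => by simp [pvStepList]
  | x :: y :: t => by
    have ih := pvFlatWindows alL (y :: t)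
    have hlen : (x :: y :: t).length - 1 = t.length + 1 := by simp
    rw [hlen, List.range_succ_eq_map, List.flatMap_cons, List.flatMap_map]
    have hshift : (fun a => (fun k =>
        if PySem.Chars.isIn alL (((x :: y :: t).drop k).take 2) then alL
        else ((x :: y :: t).drop k).take 1) (Nat.succ a))
        = (fun k => if PySem.Chars.isIn alL (((y :: t).drop k).take 2) then alL
            else ((y :: t).drop k).take 1) := by
      funext a
      simp [List.drop_succ_cons]
    rw [hshift]
    simp only [List.length_cons, Nat.add_sub_cancel] at ih
    rw [ih]
    simp [pvStepList]

lemma pvStepA_eq (alL : List Char) (s : List Char) :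
    pvStepA alL s = pvStepList alL s := by
  unfold pvStepA
  have hfun : (fun (t : List Char) (i : Int) =>
      if PySem.Chars.isIn alL (PySem.List.slice s (some i) (some (i + 2))) then t ++ alL
      else t ++ PySem.List.slice s (some i) (some (i + 1)))
      = fun t i => t ++ (if PySem.Chars.isIn alL (PySem.List.slice s (some i) (some (i + 2))) then alL
          else PySem.List.slice s (some i) (some (i + 1))) := by
    funext t i; split <;> rfl
  rw [hfun, PySem.List.foldl_append_eq_flatMap, List.nil_append]
  rw [PySem.List.pyRange_one, List.flatMap_map]
  have hnat : ((PySem.List.len s - 1) - 0).toNat = s.length - 1 := by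
    simp [PySem.List.len_eq]
  rw [hnat]
  simp only [zero_add]
  rw [show (fun (k : Nat) =>
      if PySem.Chars.isIn alL (PySem.List.slice s (some (k : Int)) (some ((k : Int) + 2))) then alL
      else PySem.List.slice s (some (k : Int)) (some ((k : Int) + 1)))
      = (fun k => if PySem.Chars.isIn alL ((s.drop k).take 2) then alL else (s.drop k).take 1) from by
    funext k; rw [pvSlice2, pvSlice1]]
  exact pvFlatWindows alL s

lemma pvStepList_length_one (c : Char) : ∀ (s : List Char),
    (pvStepList [c] s).length = s.length - 1
  | [] => by simp [pvStepList]
  | [x] => by simp [pvStepList]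
  | x :: y :: t => by
    have ih := pvStepList_length_one c (y :: t)
    simp only [pvStepList, List.length_append]
    rw [ih]
    split <;> simp only [List.length_cons, List.length_nil] <;> omega

lemma pvStepList_drop (alL : List Char) (h : 2 ≤ alL.length) : ∀ (s : List Char),
    (alL.length = 2 → ¬ alL <:+: s) → pvStepList alL s = s.dropLast
  | [], _ => by simp [pvStepList]
  | [x], _ => by simp [pvStepList]
  | x :: y :: t, hni => by
    have ih := pvStepList_drop alL h (y :: t) (fun h2 hin => hni h2 (by
      obtain ⟨u, v, huv⟩ := hin
      exact ⟨x :: u, v, by simp [← huv]⟩))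
    have hIn : PySem.Chars.isIn alL [x, y] = false := by
      rw [← Bool.not_eq_true, PySem.Chars.isIn_iff_infix]
      intro hinf
      have hle := hinf.length_le
      simp at hle
      have heq : alL = [x, y] := hinf.sublist.eq_of_length (by simp; omega)
      exact hni (by omega) (heq ▸ ⟨[], t, by simp⟩)
    simp [pvStepList, hIn, ih]

lemma pvSpec_step (c : Char) : ∀ (s : List Char),
    pvSpec [c] (pvStepList [c] s) = ((pvSpec [c] s).1 - 1, (pvSpec [c] s).2 - 1)
  | [] => by simp [pvStepList, pvSpec]
  | [x] => by
    simp only [pvStepList, pvSpec]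
    by_cases hx : x = c <;> simp [hx]
  | x :: y :: t => by
    have ih := pvSpec_step c (y :: t)
    by_cases hx : x = c <;> by_cases hy : y = c
    · subst hx; subst hy
      simp [pvStepList, pvIsIn_pair, pvSpec, ih]
    · subst hx
      have hcy : (x == y) = false := beq_eq_false_iff_ne.mpr (fun hh => hy hh.symm)
      have hly : ¬([y] = [x]) := by simp; exact fun hh => hy hh
      simp [pvStepList, pvIsIn_pair, pvSpec, ih, hcy, hly]
    · subst hy
      have hcx : (y == x) = false := beq_eq_false_iff_ne.mpr (fun hh => hx hh.symm)
      have hlx : ¬([x] = [y]) := by simp; exact fun hh => hx hh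
      simp [pvStepList, pvIsIn_pair, pvSpec, ih, hcx, hlx, Prod.ext_iff]
      omega
    · have hcx : (c == x) = false := beq_eq_false_iff_ne.mpr (fun hh => hx hh.symm)
      have hcy : (c == y) = false := beq_eq_false_iff_ne.mpr (fun hh => hy hh.symm)
      have hlx : ¬([x] = [c]) := by simp; exact fun hh => hx hh
      have hly : ¬([y] = [c]) := by simp; exact fun hh => hy hh
      simp [pvStepList, pvIsIn_pair, pvSpec, ih, hcx, hcy, hlx, hly, Prod.ext_iff]
      omega

lemma pvSpec_fst_eq_zero (alL : List Char) : ∀ (s : List Char),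
    (pvSpec alL s).1 = 0 ↔ ∀ x ∈ s, [x] = alL
  | [] => by simp [pvSpec]
  | x :: r => by
    have ih := pvSpec_fst_eq_zero alL r
    by_cases hx : [x] = alL <;> simp [pvSpec, hx, ih]

lemma pvSet_len_one (x : Char) (r : List Char) :
    (PySem.Set.ofList (x :: r)).length = 1 ↔ ∀ y ∈ r, y = x := by
  have hxm : x ∈ PySem.Set.ofList (x :: r) := (PySem.Set.mem_ofList _ _).mpr (by simp)
  constructor
  · intro h y hy
    obtain ⟨a, ha⟩ := List.length_eq_one_iff.mp h
    have hy' : y ∈ PySem.Set.ofList (x :: r) := (PySem.Set.mem_ofList _ _).mpr (by simp [hy])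
    rw [ha] at hxm hy'
    simp at hxm hy'
    rw [hxm, hy']
  · intro h
    have hall : ∀ y ∈ PySem.Set.ofList (x :: r), y = x := by
      intro y hy
      rcases List.mem_cons.mp ((PySem.Set.mem_ofList _ _).mp hy) with h1 | h2
      · exact h1
      · exact h y h2
    have hnd := PySem.Set.nodup_ofList (x :: r)
    rcases hl : PySem.Set.ofList (x :: r) with _ | ⟨a, t⟩
    · rw [hl] at hxm; simp at hxm
    · rw [hl] at hall hnd
      have ha : a = x := hall a (by simp)
      have ht : t = [] := by
        rcases t with _ | ⟨b, t'⟩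
        · rfl
        · exfalso
          have hb : b = x := hall b (by simp)
          have := hnd
          simp [ha, hb] at this
      simp [ht]

lemma pvSpec_long (alL : List Char) (h : 2 ≤ alL.length) : ∀ (s : List Char),
    pvSpec alL s = (s.length, s.length)
  | [] => by simp [pvSpec]
  | x :: r => by
    have ih := pvSpec_long alL h r
    have hx : ¬([x] = alL) := by
      intro hh
      have := congrArg List.length hh
      simp at this
      omega
    simp [pvSpec, hx, ih]

lemma pvLoop_spec (c : Char) : ∀ (fuel : Nat) (s : List Char) (cnt : Int),
    s.length < fuel → pvLoopA [c] fuel s cnt = cnt + ((pvSpec [c] s).1 : Int) := by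
  intro fuel
  induction fuel with
  | zero => intro s cnt h; omega
  | succ n ih =>
    intro s cnt h
    cases s with
    | nil => simp [pvLoopA, pvSpec]
    | cons x r =>
      show (if (x :: r).length = 0 then cnt
        else if ((PySem.Set.ofList (x :: r)).length == 1
              && ((PySem.List.pyGet? (x :: r) 0).any fun ch => decide ([c] = [ch]))) then cnt
        else pvLoopA [c] n (pvStepA [c] (x :: r)) (cnt + 1)) = _
      rw [if_neg (by simp)]
      by_cases hdone : ((PySem.Set.ofList (x :: r)).length == 1
              && ((PySem.List.pyGet? (x :: r) 0).any fun ch => decide ([c] = [ch]))) = true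
      · rw [if_pos hdone]
        simp only [PySem.List.pyGet?_zero_cons, Option.any_some, Bool.and_eq_true, beq_iff_eq,
          decide_eq_true_eq] at hdone
        obtain ⟨h1, h2⟩ := hdone
        have hxc : x = c := by
          have := congrArg (fun l => l.headI) h2
          simpa using this.symm
        have hall : ∀ y ∈ x :: r, [y] = [c] := by
          intro y hy
          rcases List.mem_cons.mp hy with h3 | h3
          · simp [h3, hxc]
          · simp [(pvSet_len_one x r).mp h1 y h3, hxc]
        rw [(pvSpec_fst_eq_zero [c] (x :: r)).mpr hall]
        simp
      · rw [if_neg hdone]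
        rw [pvStepA_eq]
        have hstep := pvStepList_length_one c (x :: r)
        have hlt : (pvStepList [c] (x :: r)).length < n := by
          simp only [List.length_cons] at hstep h
          omega
        rw [ih _ _ hlt, pvSpec_step]
        have hpos : (pvSpec [c] (x :: r)).1 ≠ 0 := by
          intro h0
          have hall := (pvSpec_fst_eq_zero [c] (x :: r)).mp h0
          apply hdone
          simp only [PySem.List.pyGet?_zero_cons, Option.any_some, Bool.and_eq_true, beq_iff_eq,
            decide_eq_true_eq]
          constructor
          · apply (pvSet_len_one x r).mpr
            intro y hy
            have h1 := hall y (by simp [hy])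
            have h2 := hall x (by simp)
            simp at h1 h2
            rw [h1, h2]
          · exact (hall x (by simp)).symm
        have h1 : 1 ≤ (pvSpec [c] (x :: r)).1 := Nat.one_le_iff_ne_zero.mpr hpos
        rw [Nat.cast_sub h1]
        push_cast
        ring

lemma pvLoop_long (alL : List Char) (h : 2 ≤ alL.length) :
    ∀ (fuel : Nat) (s : List Char) (cnt : Int),
    s.length < fuel → (alL.length = 2 → ¬ alL <:+: s) →
    pvLoopA alL fuel s cnt = cnt + (s.length : Int) := by
  intro fuel
  induction fuel with
  | zero => intro s cnt h' _; omega
  | succ n ih =>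
    intro s cnt h' hni
    cases s with
    | nil => simp [pvLoopA]
    | cons x r =>
      show (if (x :: r).length = 0 then cnt
        else if ((PySem.Set.ofList (x :: r)).length == 1
              && ((PySem.List.pyGet? (x :: r) 0).any fun ch => decide (alL = [ch]))) then cnt
        else pvLoopA alL n (pvStepA alL (x :: r)) (cnt + 1)) = _
      rw [if_neg (by simp)]
      rw [if_neg (by
        simp only [PySem.List.pyGet?_zero_cons, Option.any_some, Bool.and_eq_true, beq_iff_eq,
          decide_eq_true_eq, not_and]
        intro _ h2
        have := congrArg List.length h2
        simp at this
        omega)]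
      rw [pvStepA_eq, pvStepList_drop alL h _ hni]
      have hlt : (x :: r).dropLast.length < n := by
        simp only [List.length_dropLast, List.length_cons] at *
        omega
      rw [ih _ _ hlt (fun h2 hin => hni h2 (hin.trans (List.dropLast_prefix _).isInfix))]
      simp only [List.length_dropLast, List.length_cons]
      push_cast
      omega

lemma pvAlt_foldr (alL : List Char) : ∀ (l : List Char),
    List.foldr (fun ch (p : Int × Int) =>
      let e : Int := if [ch] = alL then 0 else p.2 + 1
      (if e > p.1 then e else p.1, e)) (0, 0) l
    = (((pvSpec alL l).1 : Int), ((pvSpec alL l).2 : Int))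
  | [] => by simp [pvSpec]
  | x :: r => by
    have ih := pvAlt_foldr alL r
    simp only [List.foldr_cons, ih, pvSpec]
    by_cases hx : [x] = alL
    · simp only [if_pos hx]
      refine Prod.ext ?_ ?_ <;> simp
    · simp only [if_neg hx]
      refine Prod.ext ?_ ?_ <;> simp <;> split_ifs <;> omega

lemma pvAlt_eq_spec (s : String) (al : String) :
    f_alt s al = ((pvSpec al.toList s.toList).1 : Int) := by
  unfold f_alt
  rw [List.foldl_reverse]
  rw [pvAlt_foldr]

-- ===== VERDICT (by name: the statement is the Claim_ definition above) =====
theorem f_spec : Claim_equal_f := by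
  intro s al _dom hpre
  unfold Spec_f
  obtain ⟨h0, h2⟩ := hpre
  rw [pvAlt_eq_spec]
  unfold f
  match hL : al.toList with
  | [] => simp [hL] at h0
  | [c] =>
    rw [pvLoop_spec c _ _ _ (by omega)]
    simp
  | [a, b] =>
    rw [hL] at h2
    rw [pvLoop_long [a, b] (by simp) _ _ _ (by omega) (h2)]
    rw [pvSpec_long [a, b] (by simp)]
    simp
  | a :: b :: c :: r =>
    rw [pvLoop_long (a :: b :: c :: r) (by simp) _ _ _ (by omega)
      (by intro hlen2; simp only [List.length_cons] at hlen2; omega)]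
    rw [pvSpec_long (a :: b :: c :: r) (by simp)]
    simp
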